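-- pv_equiv track=rewrite | github.com/ML4LitS/CAPITAL | daily_pipeline/notebooks/proptyping_metagenomics.py | get_word_position
-- ===== SOURCE A (Python) =====
-- def get_word_position(sent_id, sentence_text, char_start):
--     """
--     Calculate the word position based on character start index.
--     Returns a string in the format 'sent_id.word_position'.
--     """
--     words = sentence_text.split()
--     current_char = 0
--     for idx, word in enumerate(words):
--         word_start = sentence_text.find(word, current_char)
--         if word_start == char_start:
--             return f"{sent_id}.{idx + 1}"
--         current_char = word_start + len(word)
--     return f"{sent_id}.0"  # Return 0 if position not found
-- ===== SOURCE B (Python) =====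
-- def get_word_position(sent_id, sentence_text, char_start):
--     """Precompute the list of word-start offsets (positions where a non-space
--     character follows a space, using a space-prefixed copy of the text zipped
--     against the text itself), then look char_start up in that list."""
--     starts = [i for i, (prev, ch) in enumerate(zip(" " + sentence_text, sentence_text))
--               if prev.isspace() and not ch.isspace()]
--     try:
--         pos = starts.index(char_start) + 1
--     except ValueError:
--         pos = 0
--     return f"{sent_id}.{pos}"
-- ===== Notes on version B (the rewrite author's own statement) =====
-- stated objective: alternative
-- what changed: B replaces A's split()-then-repeated-str.find loop with a staged pipeline: it first materialises the list of all word-start offsets (a filter over the text zipped with a space-prefixed copy of itself), then answers by a single list.index lookup of char_start.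
import Mathlib
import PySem

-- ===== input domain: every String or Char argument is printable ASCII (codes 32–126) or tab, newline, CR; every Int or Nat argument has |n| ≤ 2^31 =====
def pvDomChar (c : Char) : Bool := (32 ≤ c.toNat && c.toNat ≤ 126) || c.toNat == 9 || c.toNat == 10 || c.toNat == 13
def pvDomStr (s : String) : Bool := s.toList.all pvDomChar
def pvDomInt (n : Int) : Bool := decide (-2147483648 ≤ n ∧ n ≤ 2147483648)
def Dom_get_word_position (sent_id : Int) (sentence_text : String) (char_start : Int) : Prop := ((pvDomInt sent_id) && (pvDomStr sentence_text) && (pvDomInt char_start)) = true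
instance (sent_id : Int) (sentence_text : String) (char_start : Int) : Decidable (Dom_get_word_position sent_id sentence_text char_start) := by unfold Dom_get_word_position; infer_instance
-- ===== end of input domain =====

-- B replaces split()+repeated str.find with a staged pipeline: build the list of word-start offsets once, then a single list.index lookup (objective: alternative, no substring search).

-- ===== PORT A =====
-- A's for-loop over enumerate(words) with early return; returns the 1-based word index on a hit.
def loopA (cs : List Char) (t : Int) : List (List Char) → Int → Nat → Option Nat
  | [], _, _ => none
  | w :: ws, cur, idx =>
    let ws_start := PySem.Chars.findFrom cs w cur none
    if ws_start = t then some (idx + 1)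
    else loopA cs t ws (ws_start + (w.length : Int)) (idx + 1)

def get_word_position (sent_id : Int) (sentence_text : String) (char_start : Int) : String :=
  match loopA sentence_text.toList char_start (PySem.Chars.split₀ sentence_text.toList) 0 0 with
  | some k => PySem.Int.toStr sent_id ++ "." ++ PySem.Int.toStr (k : Int)
  | none => PySem.Int.toStr sent_id ++ ".0"

-- ===== PORT B =====
-- Source B: starts = [i for i, (prev, ch) in enumerate(zip(" " + sentence_text, sentence_text)) if prev.isspace() and not ch.isspace()]
-- then starts.index(char_start) + 1, or 0 on ValueError.
def get_word_position_alt (sent_id : Int) (sentence_text : String) (char_start : Int) : String :=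
  let l := sentence_text.toList
  let starts : List Int := (PySem.List.enumerate (List.zip (' ' :: l) l) 0).filterMap
    (fun p => if PySem.Chars.isspace p.2.1 && !PySem.Chars.isspace p.2.2 then some p.1 else none)
  let pos : Int :=
    match PySem.List.index? starts char_start with
    | some k => (k : Int) + 1
    | none => 0
  PySem.Int.toStr sent_id ++ "." ++ PySem.Int.toStr pos

-- ===== PRECONDITION & SPEC =====
def Spec_get_word_position (sent_id : Int) (sentence_text : String) (char_start : Int) (out : String) : Prop := out = get_word_position_alt sent_id sentence_text char_start
instance (sent_id : Int) (sentence_text : String) (char_start : Int) (out : String) : Decidable (Spec_get_word_position sent_id sentence_text char_start out) := by unfold Spec_get_word_position; infer_instance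

-- ===== CLAIM (what is proved, stated in full; the proofs are below) =====
def Claim_equal_get_word_position : Prop := ∀ (sent_id : Int) (sentence_text : String) (char_start : Int), Dom_get_word_position sent_id sentence_text char_start → Spec_get_word_position sent_id sentence_text char_start (get_word_position sent_id sentence_text char_start)

-- ===== LEMMAS AND PROOFS =====

-- proof-only intermediate: a single scan counting word starts; both ports are reduced to it.
def scanB (t : Int) : List Char → Int → Bool → Nat → Option Nat
  | [], _, _, _ => none
  | c :: rest, i, prev_space, count =>
    let sp := PySem.Chars.isspace c
    if prev_space && !sp then
      if i = t then some (count + 1)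
      else scanB t rest (i + 1) sp (count + 1)
    else scanB t rest (i + 1) sp count

-- proof-only: recursive form of B's word-start list.
def startsRec : List Char → Bool → Int → List Int
  | [], _, _ => []
  | c :: rest, prev, i =>
    let sp := PySem.Chars.isspace c
    if prev && !sp then i :: startsRec rest sp (i + 1) else startsRec rest sp (i + 1)

-- reference form of str.split(): drop spaces, take the maximal non-space run as a word.
def myS : List Char → List (List Char)
  | [] => []
  | c :: r =>
    if PySem.Chars.isspace c then myS r
    else (c :: r.takeWhile (fun d => !PySem.Chars.isspace d)) :: myS (r.dropWhile (fun d => !PySem.Chars.isspace d))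
termination_by u => u.length
decreasing_by
  · simp
  · have := List.length_dropWhile_le (p := fun d => !PySem.Chars.isspace d) (l := r)
    simp; omega

theorem go_eq (u : List Char) : ∀ cur acc, PySem.Chars.split₀.go u cur acc =
    acc.reverse ++ (if cur = [] then myS u
      else (cur.reverse ++ u.takeWhile (fun d => !PySem.Chars.isspace d)) ::
        myS (u.dropWhile (fun d => !PySem.Chars.isspace d))) := by
  induction u with
  | nil =>
    intro cur acc
    cases cur <;> simp [PySem.Chars.split₀.go, myS]
  | cons c rest ih =>
    intro cur acc
    by_cases hc : PySem.Chars.isspace c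
    · cases cur with
      | nil => simp [PySem.Chars.split₀.go, hc, ih, myS]
      | cons x xs => simp [PySem.Chars.split₀.go, hc, ih, myS]
    · cases cur with
      | nil => simp [PySem.Chars.split₀.go, hc, ih, myS]
      | cons x xs => simp [PySem.Chars.split₀.go, hc, ih]

theorem split₀_eq_myS (cs : List Char) : PySem.Chars.split₀ cs = myS cs := by
  simp [PySem.Chars.split₀, go_eq]

theorem myS_spaces (sp : List Char) (hs : ∀ c ∈ sp, PySem.Chars.isspace c = true) (u : List Char) :
    myS (sp ++ u) = myS u := by
  induction sp with
  | nil => rfl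
  | cons c r ih =>
    have hc := hs c (by simp)
    simp only [List.cons_append, myS, hc, if_pos]
    exact ih (fun d hd => hs d (by simp [hd]))

theorem findgo_spaces (w u : List Char) (a : Char) (ha : PySem.Chars.isspace a = false)
    (hw : w.head? = some a)
    (sp : List Char) (hs : ∀ c ∈ sp, PySem.Chars.isspace c = true) :
    ∀ (j : Nat),
    PySem.Chars.find.go w (sp ++ u) j = PySem.Chars.find.go w u (j + sp.length) := by
  induction sp with
  | nil => intro j; simp
  | cons c r ih =>
    intro j
    have hc : PySem.Chars.isspace c = true := hs c (by simp)
    have hne : (a == c) = false := by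
      apply beq_eq_false_iff_ne.mpr
      intro h; rw [h, hc] at ha; exact absurd ha (by simp)
    obtain ⟨w', hw'⟩ : ∃ w', w = a :: w' := by
      cases w with
      | nil => simp at hw
      | cons b bs => simp at hw; exact ⟨bs, by rw [hw]⟩
    have step : PySem.Chars.find.go w (c :: (r ++ u)) j = PySem.Chars.find.go w (r ++ u) (j + 1) := by
      rw [hw']
      simp [PySem.Chars.find.go, List.isPrefixOf, hne]
    calc PySem.Chars.find.go w ((c :: r) ++ u) j
        = PySem.Chars.find.go w (r ++ u) (j + 1) := step
      _ = PySem.Chars.find.go w u (j + 1 + r.length) := ih (fun d hd => hs d (by simp [hd])) (j + 1)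
      _ = PySem.Chars.find.go w u (j + (c :: r).length) := by congr 1; simp; omega

theorem findgo_prefix (w rest : List Char) (hw : w ≠ []) (j : Nat) :
    PySem.Chars.find.go w (w ++ rest) j = (j : Int) := by
  obtain ⟨a, w', rfl⟩ : ∃ a w', w = a :: w' := by
    cases w with
    | nil => exact absurd rfl hw
    | cons a w' => exact ⟨a, w', rfl⟩
  have hpre : (a :: w').isPrefixOf ((a :: w') ++ rest) = true := by
    rw [List.isPrefixOf_iff_prefix]; exact ⟨rest, rfl⟩
  simp [PySem.Chars.find.go, List.isPrefixOf_iff_prefix.mpr ⟨rest, rfl⟩]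

theorem scan_spaces (t : Int) (u : List Char) (sp : List Char)
    (hs : ∀ c ∈ sp, PySem.Chars.isspace c = true) :
    ∀ (i : Int) (count : Nat),
    scanB t (sp ++ u) i true count = scanB t u (i + sp.length) true count := by
  induction sp with
  | nil => intro i count; simp
  | cons c r ih =>
    intro i count
    have hc : PySem.Chars.isspace c = true := hs c (by simp)
    have step : scanB t (c :: (r ++ u)) i true count = scanB t (r ++ u) (i + 1) true count := by
      simp [scanB, hc]
    rw [List.cons_append, step, ih (fun d hd => hs d (by simp [hd])) (i + 1)]
    congr 1
    simp; omega

theorem scan_word (t : Int) (u : List Char) (wt : List Char)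
    (hw : ∀ c ∈ wt, PySem.Chars.isspace c = false) :
    ∀ (i : Int) (count : Nat),
    scanB t (wt ++ u) i false count = scanB t u (i + wt.length) false count := by
  induction wt with
  | nil => intro i count; simp
  | cons c r ih =>
    intro i count
    have hc : PySem.Chars.isspace c = false := hw c (by simp)
    have step : scanB t (c :: (r ++ u)) i false count = scanB t (r ++ u) (i + 1) false count := by
      simp [scanB, hc]
    rw [List.cons_append, step, ih (fun d hd => hw d (by simp [hd])) (i + 1)]
    congr 1
    simp; omega

theorem scan_prev_irrel (t : Int) (u : List Char)
    (hu : u = [] ∨ ∃ c r, u = c :: r ∧ PySem.Chars.isspace c = true)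
    (i : Int) (count : Nat) (p q : Bool) :
    scanB t u i p count = scanB t u i q count := by
  rcases hu with rfl | ⟨c, r, rfl, hc⟩
  · rfl
  · simp [scanB, hc]

theorem dropWhile_head_false {p : Char → Bool} : ∀ (l : List Char) (a : Char) (v : List Char),
    l.dropWhile p = a :: v → p a = false := by
  intro l
  induction l with
  | nil => intro a v h; simp at h
  | cons c r ih =>
    intro a v h
    by_cases hc : p c
    · rw [List.dropWhile_cons_of_pos hc] at h; exact ih a v h
    · rw [List.dropWhile_cons_of_neg hc] at h
      obtain ⟨h1, _⟩ := List.cons.inj h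
      rw [← h1]; exact Bool.eq_false_iff.mpr hc

theorem main_lemma (cs : List Char) (t : Int) :
    ∀ (L : Nat) (u : List Char), u.length ≤ L → ∀ (n : Nat), n + u.length = cs.length → u = cs.drop n →
    ∀ (idx : Nat), loopA cs t (myS u) (n : Int) idx = scanB t u (n : Int) true idx := by
  intro L
  induction L with
  | zero =>
    intro u hu n _ _ idx
    have : u = [] := List.eq_nil_of_length_eq_zero (Nat.le_zero.mp hu)
    subst this
    simp [myS, loopA, scanB]
  | succ L ih =>
    intro u hu n hlen hdrop idx
    have husplit : u.takeWhile (fun c => PySem.Chars.isspace c) ++ u.dropWhile (fun c => PySem.Chars.isspace c) = u :=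
      List.takeWhile_append_dropWhile
    set sp := u.takeWhile (fun c => PySem.Chars.isspace c) with hspdef
    have hsp : ∀ c ∈ sp, PySem.Chars.isspace c = true := fun c hc => List.mem_takeWhile_imp hc
    cases hr : u.dropWhile (fun c => PySem.Chars.isspace c) with
    | nil =>
      have hu2 : u = sp ++ [] := by rw [← husplit, hr]
      rw [hu2, myS_spaces sp hsp, scan_spaces t [] sp hsp]
      simp [myS, loopA, scanB]
    | cons a v =>
      have ha : PySem.Chars.isspace a = false := by
        have := dropWhile_head_false (p := fun c => PySem.Chars.isspace c) u a v hr
        simpa using this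
      have hu2 : u = sp ++ a :: v := by rw [← husplit, hr]
      set wt := v.takeWhile (fun d => !PySem.Chars.isspace d) with hwtdef
      set v2 := v.dropWhile (fun d => !PySem.Chars.isspace d) with hv2def
      have hvsplit : wt ++ v2 = v := List.takeWhile_append_dropWhile
      have hwt : ∀ c ∈ wt, PySem.Chars.isspace c = false := by
        intro c hc
        have := List.mem_takeWhile_imp hc
        simpa using this
      have hv2head : v2 = [] ∨ ∃ c r', v2 = c :: r' ∧ PySem.Chars.isspace c = true := by
        cases hv2 : v2 with
        | nil => exact Or.inl rfl
        | cons c r' =>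
          refine Or.inr ⟨c, r', rfl, ?_⟩
          have := dropWhile_head_false (p := fun d => !PySem.Chars.isspace d) v c r' (hv2def ▸ hv2)
          simpa using this
      have hmyS : myS u = (a :: wt) :: myS v2 := by
        rw [hu2, myS_spaces sp hsp]
        rw [myS.eq_def]
        simp only [ha, Bool.false_eq_true, if_false]
        rw [← hwtdef, ← hv2def]
      have hn : n ≤ cs.length := by omega
      have hfind : PySem.Chars.find (cs.drop n) (a :: wt) = (sp.length : Int) := by
        rw [← hdrop, hu2]
        have : sp ++ a :: v = sp ++ ((a :: wt) ++ v2) := by rw [← hvsplit]; simp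
        rw [this]
        unfold PySem.Chars.find
        rw [findgo_spaces (a :: wt) ((a :: wt) ++ v2) a ha (by simp) sp hsp 0]
        simp only [Nat.zero_add]
        rw [findgo_prefix (a :: wt) v2 (by simp) sp.length]
      have hws : PySem.Chars.findFrom cs (a :: wt) (n : Int) none = (n : Int) + sp.length := by
        rw [PySem.Chars.findFrom_natCast cs (a :: wt) n hn, hfind]
        have hne : ((sp.length : Int)) ≠ -1 := by omega
        rw [if_neg hne]
      have hscan1 : scanB t u (n : Int) true idx
          = scanB t (a :: v) ((n : Int) + sp.length) true idx := by
        rw [hu2, scan_spaces t (a :: v) sp hsp]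
      rw [hmyS, hscan1]
      simp only [loopA, hws, scanB, ha, Bool.not_false, Bool.and_true]
      by_cases hhit : (n : Int) + sp.length = t
      · simp [hhit]
      · simp only [hhit, if_false]
        have hscan2 : scanB t v ((n : Int) + sp.length + 1) false (idx + 1)
            = scanB t v2 ((n : Int) + sp.length + 1 + wt.length) true (idx + 1) := by
          rw [← hvsplit, scan_word t v2 wt hwt]
          have harith : ((n : Int) + sp.length + 1) + wt.length = (n : Int) + sp.length + 1 + wt.length := rfl
          rw [harith]
          exact scan_prev_irrel t v2 hv2head _ _ false true
        rw [hscan2]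
        have hlen2 : u.length = sp.length + 1 + wt.length + v2.length := by
          rw [hu2, ← hvsplit]; simp; omega
        have hdrop2 : v2 = cs.drop (n + sp.length + 1 + wt.length) := by
          have : v2 = u.drop (sp.length + 1 + wt.length) := by
            rw [hu2, ← hvsplit]
            simp only [List.drop_append]
            rw [List.drop_eq_nil_of_le (by omega)]
            have h1 : sp.length + 1 + wt.length - sp.length = wt.length + 1 := by omega
            rw [h1]
            simp only [List.nil_append, List.drop_succ_cons]
            rw [List.drop_left]
          rw [this, hdrop, List.drop_drop]
          congr 1
          omega
        have := ih v2 (by omega) (n + sp.length + 1 + wt.length) (by omega) hdrop2 (idx + 1)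
        have hcast : ((n + sp.length + 1 + wt.length : Nat) : Int) = (n : Int) + sp.length + 1 + wt.length := by push_cast; ring
        rw [hcast] at this
        have hcur : (n : Int) + sp.length + ((a :: wt).length : Int) = (n : Int) + sp.length + 1 + wt.length := by
          simp only [List.length_cons]; push_cast; ring
        rw [hcur]
        exact this

-- B's filterMap-over-enumerate-zip list equals the recursive startsRec form.
theorem enum_starts (l : List Char) : ∀ (p : Char) (n : Int),
    (PySem.List.enumerate (List.zip (p :: l) l) n).filterMap
      (fun q => if PySem.Chars.isspace q.2.1 && !PySem.Chars.isspace q.2.2 then some q.1 else none)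
    = startsRec l (PySem.Chars.isspace p) n := by
  induction l with
  | nil => intro p n; simp [startsRec]
  | cons c r ih =>
    intro p n
    rw [List.zip_cons_cons, PySem.List.enumerate_cons, List.filterMap_cons]
    by_cases h : (PySem.Chars.isspace p && !PySem.Chars.isspace c) = true
    · rw [if_pos h, ih c (n + 1)]
      simp only [startsRec]
      rw [if_pos h]
    · rw [if_neg h, ih c (n + 1)]
      simp only [startsRec]
      rw [if_neg h]

-- the scan returns the position of t in the start list, offset by count.
theorem scan_index (t : Int) : ∀ (l : List Char) (i : Int) (prev : Bool) (count : Nat),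
    scanB t l i prev count =
      (match PySem.List.index? (startsRec l prev i) t with
       | some k => some (count + k + 1)
       | none => none) := by
  intro l
  induction l with
  | nil => intro i prev count; simp [scanB, startsRec, PySem.List.index?_eq_idxOf?, List.idxOf?]
  | cons c r ih =>
    intro i prev count
    by_cases h : prev && !PySem.Chars.isspace c
    · simp only [scanB, startsRec, h, if_pos]
      by_cases hit : i = t
      · rw [if_pos hit, hit, PySem.List.index?_cons_self]
      · rw [if_neg hit, PySem.List.index?_cons_of_ne _ hit]
        rw [ih (i + 1) (PySem.Chars.isspace c) (count + 1)]
        cases hidx : PySem.List.index? (startsRec r (PySem.Chars.isspace c) (i + 1)) t with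
        | none => simp
        | some k => simp; omega
    · simp only [scanB, startsRec, h]
      exact ih (i + 1) (PySem.Chars.isspace c) count

-- ===== VERDICT (by name: the statement is the Claim_ definition above) =====
theorem get_word_position_spec : Claim_equal_get_word_position := by
  intro sent_id s t _
  unfold Spec_get_word_position get_word_position get_word_position_alt
  have hA : loopA s.toList t (PySem.Chars.split₀ s.toList) 0 0 = scanB t s.toList 0 true 0 := by
    have h := main_lemma s.toList t s.toList.length s.toList (le_refl _) 0 (by simp) (by simp) 0
    rw [split₀_eq_myS]
    simpa using h
  have hsp : PySem.Chars.isspace ' ' = true := by decide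
  have hB := enum_starts s.toList ' ' 0
  rw [hsp] at hB
  have hS := scan_index t s.toList 0 true 0
  simp only [hA, hS, hB]
  cases hidx : PySem.List.index? (startsRec s.toList true 0) t with
  | none =>
    rw [String.append_assoc]
    rfl
  | some k =>
    show PySem.Int.toStr sent_id ++ "." ++ PySem.Int.toStr ((0 + k + 1 : Nat) : Int)
      = PySem.Int.toStr sent_id ++ "." ++ PySem.Int.toStr ((k : Int) + 1)
    have hck : ((0 + k + 1 : Nat) : Int) = (k : Int) + 1 := by push_cast; ring
    rw [hck]
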